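-- pv_equiv track=rewrite | github.com/HungTruong4689/neetcode-submissions-mj6cq8u3 | Data Structures & Algorithms/largest-3-same-digit-number-in-string/submission-1.py | largestGoodInteger
-- ===== SOURCE A (Python) =====
-- def largestGoodInteger(num: str) -> str:
--     res =""
--
--     for i in range(len(num)-3):
--         if num[i] == num[i+1]== num[i+2]:
--             cand = num[i] + num[i+1] + num[i+2]
--             if cand >res:
--                 res = cand
--     return res
-- ===== SOURCE B (Python) =====
-- def largestGoodInteger(num: str) -> str:
--     for c in sorted(set(num), reverse=True):
--         if c * 3 in num:
--             return c * 3
--     return ""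
-- ===== Notes on version B (the rewrite author's own statement) =====
-- stated objective: simpler
-- what changed: A scans index windows in a Python-level loop tracking a running string maximum; B searches answer-first: it iterates the distinct characters of num in descending order and returns c*3 for the first c whose triple occurs as a substring.
-- intended difference: On strings whose last three characters form a triple strictly larger than every triple starting before position len-3, A returns the smaller or empty result because range(len(num)-3) stops one window early, while B returns that largest triple, which is the intended value. — e.g. on largestGoodInteger("7333"): A returns "", B returns "333"
import Mathlib
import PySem

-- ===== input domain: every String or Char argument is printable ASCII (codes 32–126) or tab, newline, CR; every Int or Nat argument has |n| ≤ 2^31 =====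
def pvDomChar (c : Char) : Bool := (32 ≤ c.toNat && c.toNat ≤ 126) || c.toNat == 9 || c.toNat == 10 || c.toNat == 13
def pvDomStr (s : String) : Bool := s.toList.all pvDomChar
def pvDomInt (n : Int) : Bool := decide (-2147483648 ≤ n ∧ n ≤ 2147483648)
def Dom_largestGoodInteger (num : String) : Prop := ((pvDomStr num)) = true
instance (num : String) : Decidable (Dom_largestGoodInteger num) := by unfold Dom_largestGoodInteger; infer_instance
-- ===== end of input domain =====

-- B replaces A's windowed scan (running string max over index triples) by an answer-first search:
-- iterate the distinct characters of num in descending order and return c*3 for the first c whose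
-- triple occurs as a substring (objective: simpler; A also misses the triple at the very end — see D_).

-- ===== PORT A =====
def largestGoodInteger (num : String) : String :=
  (PySem.List.pyRange 0 ((num.toList.length : Int) - 3) 1).foldl
    (fun res i =>
      let a := PySem.List.pyGetD num.toList i ' '
      let b := PySem.List.pyGetD num.toList (i + 1) ' '
      let c := PySem.List.pyGetD num.toList (i + 2) ' '
      if a = b ∧ b = c then
        let cand := String.ofList [a, b, c]
        if res < cand then cand else res
      else res) ""

-- ===== PORT B =====
def largestGoodInteger_alt (num : String) : String :=
  match (PySem.List.sorted (PySem.Set.ofList num.toList) (fun c => c) true).find?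
      (fun c => PySem.Str.isIn (String.ofList [c, c, c]) num) with
  | some c => String.ofList [c, c, c]
  | none => ""

-- ===== PRECONDITION & SPEC =====
-- Does a triple of three equal characters `c` with `d ≤ c` occur in `l`? (a plain
-- membership test on adjacent triples, used only to state the change region below)
def pvGeTripIn (d : Char) : List Char → Bool
  | a :: b :: c :: rest => (a == b && b == c && decide (d ≤ a)) || pvGeTripIn d (b :: c :: rest)
  | _ => false

-- A's loop `range(len(num)-3)` stops one window early, so on strings whose LAST three characters
-- form a triple strictly larger than every earlier triple, A returns the smaller (or empty) result
-- while B returns that largest triple, which is the intended value.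
def D_largestGoodInteger (num : String) : Prop :=
  3 ≤ num.toList.length ∧
  num.toList.getD (num.toList.length - 3) ' ' = num.toList.getD (num.toList.length - 2) ' ' ∧
  num.toList.getD (num.toList.length - 2) ' ' = num.toList.getD (num.toList.length - 1) ' ' ∧
  pvGeTripIn (num.toList.getD (num.toList.length - 1) ' ') num.toList.dropLast = false
instance (num : String) : Decidable (D_largestGoodInteger num) := by
  unfold D_largestGoodInteger; infer_instance

def Spec_largestGoodInteger (num : String) (out : String) : Prop :=
  ¬ D_largestGoodInteger num → out = largestGoodInteger_alt num
instance (num : String) (out : String) : Decidable (Spec_largestGoodInteger num out) := by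
  unfold Spec_largestGoodInteger; infer_instance

def pvDiffWitness_largestGoodInteger : String := "7333"
def pvDiffWitnessOut_largestGoodInteger : String × String := ("", "333")

-- ===== CLAIM (what is proved, stated in full; the proofs are below) =====
def Claim_unchanged_largestGoodInteger : Prop := ∀ (num : String), Dom_largestGoodInteger num → Spec_largestGoodInteger num (largestGoodInteger num)
def Claim_changed_largestGoodInteger : Prop := Dom_largestGoodInteger (pvDiffWitness_largestGoodInteger) ∧ D_largestGoodInteger (pvDiffWitness_largestGoodInteger) ∧ largestGoodInteger (pvDiffWitness_largestGoodInteger) = pvDiffWitnessOut_largestGoodInteger.1 ∧ largestGoodInteger_alt (pvDiffWitness_largestGoodInteger) = pvDiffWitnessOut_largestGoodInteger.2 ∧ pvDiffWitnessOut_largestGoodInteger.1 ≠ pvDiffWitnessOut_largestGoodInteger.2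
def Claim_exact_largestGoodInteger : Prop := ∀ (num : String), Dom_largestGoodInteger num → D_largestGoodInteger num → largestGoodInteger num ≠ largestGoodInteger_alt num

-- ===== LEMMAS AND PROOFS =====

/-- `c` repeated three times, as a string. -/
def pvS3 (c : Char) : String := String.ofList [c, c, c]

def pvRender : Option Char → String
  | some c => pvS3 c
  | none => ""

/-- The window of `l` at position `i` (read with `getD`) is a triple. -/
def pvTrip (l : List Char) (i : Nat) : Prop :=
  l.getD i ' ' = l.getD (i + 1) ' ' ∧ l.getD (i + 1) ' ' = l.getD (i + 2) ' '

/-- `ccc` occurs in `l`. -/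
def pvHasTrip (l : List Char) (c : Char) : Prop := [c, c, c] <:+: l

/-- `o` is the best (largest) triple character among windows `i < m`, or `none`. -/
def pvBestA (l : List Char) (m : Nat) : Option Char → Prop
  | none => ∀ i, i < m → ¬ pvTrip l i
  | some c => (∃ i, i < m ∧ pvTrip l i ∧ l.getD i ' ' = c) ∧
      (∀ i, i < m → pvTrip l i → l.getD i ' ' ≤ c)

/-- `o` is the largest character whose triple occurs in `l`, or `none`. -/
def pvBestB (l : List Char) : Option Char → Prop
  | none => ∀ c, ¬ pvHasTrip l c
  | some c => pvHasTrip l c ∧ ∀ c', pvHasTrip l c' → c' ≤ c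

theorem pvS3_ne_empty (c : Char) : pvS3 c ≠ "" := by
  intro h
  have h2 := congrArg String.toList h
  simp [pvS3] at h2

theorem pvS3_inj {b c : Char} (h : pvS3 b = pvS3 c) : b = c := by
  have h2 := congrArg String.toList h
  simp [pvS3] at h2
  exact h2

theorem pvEmpty_lt_pvS3 (c : Char) : ("" : String) < pvS3 c := by
  rw [pvS3, String.lt_iff_toList_lt]; simp

theorem pvS3_lt_iff (b c : Char) : pvS3 b < pvS3 c ↔ b < c := by
  rw [pvS3, pvS3, String.lt_iff_toList_lt]
  simp [List.cons_lt_cons_iff]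
  rintro rfl (h | ⟨_, h⟩) <;> exact h

theorem pvHasTrip_iff_window (l : List Char) (c : Char) :
    pvHasTrip l c ↔ ∃ i, i + 3 ≤ l.length ∧ pvTrip l i ∧ l.getD i ' ' = c := by
  constructor
  · rintro ⟨s, t, h⟩
    refine ⟨s.length, ?_, ?_, ?_⟩
    · have := congrArg List.length h
      simp at this
      omega
    · constructor <;>
      · rw [← h]
        simp [List.getD]
    · rw [← h]
      simp [List.getD]
  · rintro ⟨i, hlen, ⟨h1, h2⟩, hc⟩
    have g0 : l.getD i ' ' = l[i]'(by omega) := List.getD_eq_getElem l ' ' (by omega)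
    have g1 : l.getD (i+1) ' ' = l[i+1]'(by omega) := List.getD_eq_getElem l ' ' (by omega)
    have g2 : l.getD (i+2) ' ' = l[i+2]'(by omega) := List.getD_eq_getElem l ' ' (by omega)
    have e0 : l[i]'(by omega) = c := by rw [← g0, hc]
    have e1 : l[i+1]'(by omega) = c := by rw [← g1, ← h1, g0, e0]
    have e2 : l[i+2]'(by omega) = c := by rw [← g2, ← h2, g1, e1]
    refine ⟨l.take i, l.drop (i + 3), ?_⟩
    have hmid : (l.drop i).take 3 = [c, c, c] := by
      apply List.ext_getElem
      · simp; omega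
      · intro k hk1 hk2
        simp only [List.length_take, List.length_drop] at hk1
        have hk3 : k < 3 := by omega
        simp only [List.getElem_take, List.getElem_drop]
        interval_cases k
        · simpa using e0
        · simpa [Nat.add_comm] using e1
        · simpa [Nat.add_comm] using e2
    calc l.take i ++ [c, c, c] ++ l.drop (i + 3)
        = l.take i ++ ((l.drop i).take 3 ++ ((l.drop i).drop 3)) := by
          rw [hmid]; simp [List.drop_drop]
      _ = l := by rw [List.take_append_drop, List.take_append_drop]


theorem pvFoldA_best (l : List Char) (m : Nat) :
    ∃ o, (PySem.List.pyRange 0 (m : Int) 1).foldl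
      (fun res i =>
        let a := PySem.List.pyGetD l i ' '
        let b := PySem.List.pyGetD l (i + 1) ' '
        let c := PySem.List.pyGetD l (i + 2) ' '
        if a = b ∧ b = c then
          let cand := String.ofList [a, b, c]
          if res < cand then cand else res
        else res) "" = pvRender o ∧ pvBestA l m o := by
  induction m with
  | zero =>
    refine ⟨none, ?_, ?_⟩
    · simp [pvRender]
    · intro i hi; omega
  | succ n ih =>
    obtain ⟨o, ho, hbest⟩ := ih
    have hsplit : PySem.List.pyRange 0 ((n + 1 : Nat) : Int) 1
        = PySem.List.pyRange 0 (n : Int) 1 ++ [(n : Int)] := by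
      push_cast
      exact PySem.List.pyRange_one_succ_right (by positivity)
    rw [hsplit, List.foldl_append, ho]
    simp only [List.foldl_cons, List.foldl_nil, PySem.List.pyGetD_natCast]
    have c1 : ((n : Int) + 1) = ((n + 1 : Nat) : Int) := by push_cast; ring
    have c2 : ((n : Int) + 2) = ((n + 2 : Nat) : Int) := by push_cast; ring
    rw [c1, c2, PySem.List.pyGetD_natCast, PySem.List.pyGetD_natCast]
    by_cases htrip : pvTrip l n
    · obtain ⟨h1, h2⟩ := htrip
      rw [if_pos ⟨h1, h2⟩]
      -- cand = String.ofList [getD n, getD (n+1), getD (n+2)] = pvS3 (getD n)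
      have hcand : String.ofList [l.getD n ' ', l.getD (n+1) ' ', l.getD (n+2) ' ']
          = pvS3 (l.getD n ' ') := by rw [pvS3, ← h2, ← h1]
      rw [hcand]
      match o, hbest with
      | none, hb =>
        rw [if_pos (show pvRender none < pvS3 (l.getD n ' ') from pvEmpty_lt_pvS3 _)]
        refine ⟨some (l.getD n ' '), rfl, ⟨n, by omega, ⟨h1, h2⟩, rfl⟩, ?_⟩
        intro i hi ht
        rcases Nat.lt_or_ge i n with h | h
        · exact absurd ht (hb i h)
        · have : i = n := by omega
          subst this; exact le_refl _
      | some b, hb =>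
        by_cases hlt : pvRender (some b) < pvS3 (l.getD n ' ')
        · rw [if_pos hlt]
          have hblt : b < l.getD n ' ' := (pvS3_lt_iff b _).mp hlt
          refine ⟨some (l.getD n ' '), rfl, ⟨n, by omega, ⟨h1, h2⟩, rfl⟩, ?_⟩
          intro i hi ht
          rcases Nat.lt_or_ge i n with h | h
          · exact le_trans (hb.2 i h ht) (le_of_lt hblt)
          · have : i = n := by omega
            subst this; exact le_refl _
        · rw [if_neg hlt]
          have hge : l.getD n ' ' ≤ b := by
            by_contra hc
            exact hlt ((pvS3_lt_iff b _).mpr (lt_of_not_ge hc))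
          obtain ⟨⟨j, hj, hjt, hjc⟩, hub⟩ := hb
          refine ⟨some b, rfl, ⟨j, by omega, hjt, hjc⟩, ?_⟩
          intro i hi ht
          rcases Nat.lt_or_ge i n with h | h
          · exact hub i h ht
          · have : i = n := by omega
            subst this; exact hge
    · rw [if_neg (by exact htrip)]
      match o, hbest with
      | none, hb =>
        refine ⟨none, rfl, ?_⟩
        intro i hi
        rcases Nat.lt_or_ge i n with h | h
        · exact hb i h
        · have : i = n := by omega
          subst this; exact htrip
      | some b, hb =>
        obtain ⟨⟨j, hj, hjt, hjc⟩, hub⟩ := hb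
        refine ⟨some b, rfl, ⟨j, by omega, hjt, hjc⟩, ?_⟩
        intro i hi ht
        rcases Nat.lt_or_ge i n with h | h
        · exact hub i h ht
        · have : i = n := by omega
          subst this; exact absurd ht htrip

theorem pvA_best (num : String) :
    ∃ o, largestGoodInteger num = pvRender o ∧ pvBestA num.toList (num.toList.length - 3) o := by
  have hr : PySem.List.pyRange 0 ((num.toList.length : Int) - 3) 1
      = PySem.List.pyRange 0 ((num.toList.length - 3 : Nat) : Int) 1 := by
    rcases Nat.lt_or_ge num.toList.length 3 with h | h
    · rw [PySem.List.pyRange_one_eq_nil (by omega),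
        PySem.List.pyRange_one_eq_nil (by omega)]
    · congr 1
      push_cast [Nat.cast_sub h]
      ring
  unfold largestGoodInteger
  rw [hr]
  exact pvFoldA_best num.toList (num.toList.length - 3)

theorem pvIsIn_iff (num : String) (c : Char) :
    (PySem.Str.isIn (String.ofList [c, c, c]) num = true) ↔ pvHasTrip num.toList c := by
  rw [PySem.Str.isIn_iff_infix, String.toList_ofList, pvHasTrip]

theorem pvSorted_pairwise_gt (num : String) :
    (PySem.List.sorted (PySem.Set.ofList num.toList) (fun c => c) true).Pairwise
      (fun a b => b < a) := by
  have h1 := PySem.List.sorted_pairwise_rev (PySem.Set.ofList num.toList) (fun c : Char => c)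
  have h2 : (PySem.List.sorted (PySem.Set.ofList num.toList) (fun c : Char => c) true).Nodup :=
    ((PySem.List.sorted_perm (PySem.Set.ofList num.toList) (fun c : Char => c) true).nodup_iff).mpr
      (PySem.Set.nodup_ofList num.toList)
  have := h1.and h2
  exact this.imp (fun h => lt_of_le_of_ne h.1 (fun he => h.2 (he ▸ rfl)))

theorem pvMem_sorted_of_hasTrip (num : String) (c : Char) (h : pvHasTrip num.toList c) :
    c ∈ PySem.List.sorted (PySem.Set.ofList num.toList) (fun c => c) true := by
  have hc : c ∈ num.toList := h.subset (by simp)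
  rw [(PySem.List.sorted_perm (PySem.Set.ofList num.toList) (fun c : Char => c) true).mem_iff]
  rw [PySem.Set.mem_ofList]
  exact hc

theorem pvB_best (num : String) :
    ∃ o, largestGoodInteger_alt num = pvRender o ∧ pvBestB num.toList o := by
  unfold largestGoodInteger_alt
  cases hf : (PySem.List.sorted (PySem.Set.ofList num.toList) (fun c => c) true).find?
      (fun c => PySem.Str.isIn (String.ofList [c, c, c]) num) with
  | none =>
    refine ⟨none, rfl, ?_⟩
    intro c hc
    have hmem := pvMem_sorted_of_hasTrip num c hc
    have := List.find?_eq_none.mp hf c hmem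
    exact this ((pvIsIn_iff num c).mpr hc)
  | some c =>
    refine ⟨some c, rfl, ?_, ?_⟩
    · exact (pvIsIn_iff num c).mp (List.find?_eq_some_iff_append.mp hf).1
    · intro c' hc'
      obtain ⟨hp, as, bs, heq, hall⟩ := List.find?_eq_some_iff_append.mp hf
      have hmem := pvMem_sorted_of_hasTrip num c' hc'
      rw [heq] at hmem
      rcases List.mem_append.mp hmem with h | h
      · exact absurd ((pvIsIn_iff num c').mpr hc')
          (by simpa using hall c' h)
      · rcases List.mem_cons.mp h with h | h
        · exact le_of_eq h
        · have hpw := pvSorted_pairwise_gt num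
          rw [heq] at hpw
          have := (List.pairwise_append.mp hpw).2
          have := (List.pairwise_cons.mp this.1).1 c' h
          exact le_of_lt this


theorem pvGeTripIn_iff (d : Char) : ∀ l : List Char,
    pvGeTripIn d l = true ↔ ∃ c, d ≤ c ∧ [c, c, c] <:+: l
  | a :: b :: e :: rest => by
    rw [pvGeTripIn]
    constructor
    · intro h
      simp only [Bool.or_eq_true] at h
      rcases h with h | h
      · simp only [Bool.and_eq_true, beq_iff_eq, decide_eq_true_eq] at h
        obtain ⟨⟨rfl, rfl⟩, hd⟩ := h
        exact ⟨a, hd, ⟨[], rest, rfl⟩⟩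
      · obtain ⟨c, hd, hinf⟩ := (pvGeTripIn_iff d (b :: e :: rest)).mp h
        exact ⟨c, hd, hinf.trans (List.suffix_cons a _).isInfix⟩
    · rintro ⟨c, hd, hinf⟩
      rcases List.infix_cons_iff.mp hinf with hpre | hinf'
      · obtain ⟨h1, hpre⟩ := List.cons_prefix_cons.mp hpre
        obtain ⟨h2, hpre⟩ := List.cons_prefix_cons.mp hpre
        obtain ⟨h3, _⟩ := List.cons_prefix_cons.mp hpre
        simp only [Bool.or_eq_true]
        exact Or.inl (by simp [← h1, ← h2, ← h3, hd])
      · simp only [Bool.or_eq_true]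
        exact Or.inr ((pvGeTripIn_iff d (b :: e :: rest)).mpr ⟨c, hd, hinf'⟩)
  | [] => by
    simp only [pvGeTripIn, Bool.false_eq_true, false_iff]
    rintro ⟨c, _, hinf⟩
    have := hinf.length_le
    simp at this
  | [a] => by
    simp only [pvGeTripIn, Bool.false_eq_true, false_iff]
    rintro ⟨c, _, hinf⟩
    have := hinf.length_le
    simp at this
  | [a, b] => by
    simp only [pvGeTripIn, Bool.false_eq_true, false_iff]
    rintro ⟨c, _, hinf⟩
    have := hinf.length_le
    simp at this

theorem pvHasTrip_dropLast_iff (l : List Char) (c : Char) :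
    pvHasTrip l.dropLast c ↔
      ∃ i, i < l.length - 3 ∧ pvTrip l i ∧ l.getD i ' ' = c := by
  have hg : ∀ j, j < l.length - 1 → l.dropLast.getD j ' ' = l.getD j ' ' := by
    intro j hj
    rw [List.getD_eq_getElem _ _ (by simp; omega), List.getD_eq_getElem _ _ (by omega),
      List.getElem_dropLast]
  rw [pvHasTrip_iff_window]
  constructor
  · rintro ⟨i, hlen, ⟨h1, h2⟩, hc⟩
    rw [List.length_dropLast] at hlen
    rw [hg i (by omega)] at hc
    rw [hg i (by omega), hg (i+1) (by omega)] at h1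
    rw [hg (i+1) (by omega), hg (i+2) (by omega)] at h2
    exact ⟨i, by omega, ⟨h1, h2⟩, hc⟩
  · rintro ⟨i, hlen, ⟨h1, h2⟩, hc⟩
    refine ⟨i, by simp; omega, ⟨?_, ?_⟩, ?_⟩
    · rw [hg i (by omega), hg (i+1) (by omega)]; exact h1
    · rw [hg (i+1) (by omega), hg (i+2) (by omega)]; exact h2
    · rw [hg i (by omega)]; exact hc

theorem pvD_iff (num : String) :
    D_largestGoodInteger num ↔
      (3 ≤ num.toList.length ∧ pvTrip num.toList (num.toList.length - 3) ∧
       ∀ i < num.toList.length - 3, pvTrip num.toList i →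
         num.toList.getD i ' ' < num.toList.getD (num.toList.length - 1) ' ') := by
  unfold D_largestGoodInteger pvTrip
  have hzip : pvGeTripIn (num.toList.getD (num.toList.length - 1) ' ') num.toList.dropLast = false ↔
      ∀ i < num.toList.length - 3, pvTrip num.toList i →
        num.toList.getD i ' ' < num.toList.getD (num.toList.length - 1) ' ' := by
    rw [Bool.eq_false_iff, Ne, pvGeTripIn_iff]
    constructor
    · intro h i hi ht
      by_contra hge
      exact h ⟨num.toList.getD i ' ', le_of_not_gt (by simpa using hge),
        (pvHasTrip_dropLast_iff num.toList _).mpr ⟨i, hi, ht, rfl⟩⟩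
    · rintro h ⟨c, hd, hinf⟩
      obtain ⟨i, hi, ht, hc⟩ := (pvHasTrip_dropLast_iff num.toList c).mp hinf
      have := h i hi ht
      rw [hc] at this
      exact absurd hd (not_le_of_gt this)
  constructor
  · rintro ⟨h3, ha, hb, hub⟩
    have e1 : num.toList.length - 3 + 1 = num.toList.length - 2 := by omega
    have e2 : num.toList.length - 3 + 2 = num.toList.length - 1 := by omega
    exact ⟨h3, ⟨by rw [e1]; exact ha, by rw [e1, e2]; exact hb⟩, hzip.mp hub⟩
  · rintro ⟨h3, ⟨ha, hb⟩, hub⟩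
    have e1 : num.toList.length - 3 + 1 = num.toList.length - 2 := by omega
    have e2 : num.toList.length - 3 + 2 = num.toList.length - 1 := by omega
    exact ⟨h3, by rw [← e1]; exact ha, by rw [← e1, ← e2]; exact hb, hzip.mpr hub⟩

theorem pvBest_eq_of_not_D (num : String) (oA oB : Option Char)
    (hA : pvBestA num.toList (num.toList.length - 3) oA)
    (hB : pvBestB num.toList oB)
    (hnd : ¬ D_largestGoodInteger num) : oA = oB := by
  rw [pvD_iff] at hnd
  push Not at hnd
  have hAtoB : ∀ i, i < num.toList.length - 3 → pvTrip num.toList i →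
      pvHasTrip num.toList (num.toList.getD i ' ') :=
    fun i hi ht => (pvHasTrip_iff_window num.toList _).mpr ⟨i, by omega, ht, rfl⟩
  have keyB : ∀ b, pvHasTrip num.toList b →
      (∃ i, i < num.toList.length - 3 ∧ pvTrip num.toList i ∧ num.toList.getD i ' ' = b) ∨
      (3 ≤ num.toList.length ∧ pvTrip num.toList (num.toList.length - 3) ∧
        num.toList.getD (num.toList.length - 3) ' ' = b) := by
    intro b hb
    obtain ⟨j, hj, ht, hc⟩ := (pvHasTrip_iff_window num.toList b).mp hb
    rcases Nat.lt_or_ge j (num.toList.length - 3) with h | h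
    · exact Or.inl ⟨j, h, ht, hc⟩
    · have hj3 : j = num.toList.length - 3 := by omega
      subst hj3
      exact Or.inr ⟨by omega, ht, hc⟩
  have bdry : 3 ≤ num.toList.length → pvTrip num.toList (num.toList.length - 3) →
      ∃ i, i < num.toList.length - 3 ∧ pvTrip num.toList i ∧
        num.toList.getD (num.toList.length - 3) ' ' ≤ num.toList.getD i ' ' := by
    intro h3 ht
    have e2 : num.toList.length - 3 + 2 = num.toList.length - 1 := by omega
    have hlast : num.toList.getD (num.toList.length - 1) ' '
        = num.toList.getD (num.toList.length - 3) ' ' := by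
      rw [← e2, ← ht.2, ← ht.1]
    obtain ⟨i, hi, hti, hge⟩ := hnd h3 ht
    exact ⟨i, hi, hti, by rw [← hlast]; exact hge⟩
  match oA, oB, hA, hB with
  | none, none, _, _ => rfl
  | some a, none, hA, hB =>
    obtain ⟨⟨i, hi, ht, hc⟩, _⟩ := hA
    exact absurd (hc ▸ hAtoB i hi ht) (hB a)
  | none, some b, hA, hB =>
    exfalso
    rcases keyB b hB.1 with ⟨i, hi, ht, _⟩ | ⟨h3, htb, _⟩
    · exact hA i hi ht
    · obtain ⟨i, hi, hti, _⟩ := bdry h3 htb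
      exact hA i hi hti
  | some a, some b, hA, hB =>
    have h1 : a ≤ b := by
      obtain ⟨⟨i, hi, ht, hc⟩, _⟩ := hA
      exact hB.2 a (hc ▸ hAtoB i hi ht)
    have h2 : b ≤ a := by
      rcases keyB b hB.1 with ⟨i, hi, ht, hc⟩ | ⟨h3, htb, hcb⟩
      · exact hc ▸ hA.2 i hi ht
      · obtain ⟨i, hi, hti, hge⟩ := bdry h3 htb
        calc b = num.toList.getD (num.toList.length - 3) ' ' := hcb.symm
          _ ≤ num.toList.getD i ' ' := hge
          _ ≤ a := hA.2 i hi hti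
    exact congrArg some (le_antisymm h1 h2)

-- ===== VERDICT (by name: the statement is the Claim_ definition above) =====
theorem largestGoodInteger_spec : Claim_unchanged_largestGoodInteger := by
  intro num _ hnd
  obtain ⟨oA, hAeq, hA⟩ := pvA_best num
  obtain ⟨oB, hBeq, hB⟩ := pvB_best num
  rw [hAeq, hBeq, pvBest_eq_of_not_D num oA oB hA hB hnd]

theorem largestGoodInteger_changed : Claim_changed_largestGoodInteger := by
  unfold Claim_changed_largestGoodInteger; decide

theorem largestGoodInteger_tight : Claim_exact_largestGoodInteger := by
  intro num _ hd
  obtain ⟨h3, ht, hub⟩ := (pvD_iff num).mp hd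
  obtain ⟨oA, hAeq, hA⟩ := pvA_best num
  obtain ⟨oB, hBeq, hB⟩ := pvB_best num
  have e2 : num.toList.length - 3 + 2 = num.toList.length - 1 := by omega
  have hlast : num.toList.getD (num.toList.length - 1) ' '
      = num.toList.getD (num.toList.length - 3) ' ' := by
    rw [← e2, ← ht.2, ← ht.1]
  have hc0 : pvHasTrip num.toList (num.toList.getD (num.toList.length - 3) ' ') :=
    (pvHasTrip_iff_window _ _).mpr ⟨num.toList.length - 3, by omega, ht, rfl⟩
  have hoB : oB = some (num.toList.getD (num.toList.length - 3) ' ') := by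
    match oB, hB with
    | none, hB => exact absurd hc0 (hB _)
    | some b, hB =>
      obtain ⟨j, hj, htj, hcj⟩ := (pvHasTrip_iff_window _ _).mp hB.1
      have hble : b ≤ num.toList.getD (num.toList.length - 3) ' ' := by
        rcases Nat.lt_or_ge j (num.toList.length - 3) with h | h
        · have hlt := hub j h htj
          rw [hlast] at hlt
          rw [← hcj]
          exact le_of_lt hlt
        · have hj3 : j = num.toList.length - 3 := by omega
          rw [← hcj, hj3]
      exact congrArg some (le_antisymm hble (hB.2 _ hc0))
  rw [hAeq, hBeq, hoB]
  match oA, hA with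
  | none, _ => exact fun h => pvS3_ne_empty _ h.symm
  | some a, hA =>
    obtain ⟨⟨i, hi, hti, hci⟩, _⟩ := hA
    have halt : a < num.toList.getD (num.toList.length - 3) ' ' := by
      have hlt := hub i hi hti
      rw [hlast] at hlt
      rw [← hci]
      exact hlt
    intro h
    exact absurd (pvS3_inj h) (ne_of_lt halt)
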